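-- pv_equiv track=rewrite | github.com/Jsonming/leetcode | process_script/audio_check.py | spain
-- ===== SOURCE A (Python) =====
-- def spain(userinfo):
--     userinfos = {}
--     for group, infos in userinfo.items():
--         if infos['city'] in userinfos:
--             userinfos[infos['city']].update({group: infos})
--         else:
--             userinfos.update({infos['city']: {group: infos}})
--     return userinfos
-- ===== SOURCE B (Python) =====
-- def spain(userinfo):
--     items = list(userinfo.items())
--     cities = list(dict.fromkeys(infos['city'] for _, infos in items))
--     return {c: {g: i for g, i in items if i['city'] == c} for c in cities}
-- ===== Notes on version B (the rewrite author's own statement) =====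
-- stated objective: alternative
-- what changed: A buckets items into a dict of dicts in a single hash pass with a contains/update branch; B instead first computes the ordered-deduplicated list of cities and then builds each city's inner dict by a dict comprehension filtering the items, preserving A's key order.
import Mathlib
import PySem

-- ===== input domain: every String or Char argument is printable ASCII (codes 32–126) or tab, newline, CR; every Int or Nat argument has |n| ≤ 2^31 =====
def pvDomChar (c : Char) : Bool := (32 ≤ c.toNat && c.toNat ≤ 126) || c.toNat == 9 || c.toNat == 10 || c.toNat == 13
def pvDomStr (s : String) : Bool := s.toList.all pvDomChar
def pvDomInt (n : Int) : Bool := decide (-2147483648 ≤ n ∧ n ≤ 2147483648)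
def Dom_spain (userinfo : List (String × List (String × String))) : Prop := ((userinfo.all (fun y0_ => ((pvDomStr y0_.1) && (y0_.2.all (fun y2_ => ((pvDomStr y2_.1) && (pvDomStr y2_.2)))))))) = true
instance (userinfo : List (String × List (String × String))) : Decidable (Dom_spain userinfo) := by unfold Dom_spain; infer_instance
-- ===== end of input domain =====

-- B replaces A's single hash-bucketing pass by an ordered dedup of the cities followed by
-- a per-city filter pass (alternative decomposition; same return value, same key order).


-- ===== PORT A =====
-- infos['city']: first-match lookup in the infos association list (KeyError → Pre_; the
-- .getD "" default is never reached inside Pre_)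
def cityOf (gi : String × List (String × String)) : String :=
  ((PySem.Dict.mk gi.2).get? "city").getD ""

-- one iteration of A's loop: bucket the (group, infos) pair under its city
def spainStep (acc : PySem.Dict String (PySem.Dict String (List (String × String))))
    (gi : String × List (String × String)) :
    PySem.Dict String (PySem.Dict String (List (String × String))) :=
  if acc.contains (cityOf gi) then
    acc.modify (cityOf gi) PySem.Dict.empty (fun d => d.insert gi.1 gi.2)
  else
    acc.insert (cityOf gi) (PySem.Dict.empty.insert gi.1 gi.2)

def spain (userinfo : List (String × List (String × String))) :
    List (String × List (String × List (String × String))) :=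
  ((userinfo.foldl spainStep PySem.Dict.empty).items).map (fun p => (p.1, p.2.items))

-- ===== PORT B =====
-- inner dict comprehension {g: i for g, i in items if i['city'] == c}
def innerFor (userinfo : List (String × List (String × String))) (c : String) :
    List (String × List (String × String)) :=
  ((userinfo.filter (fun gi => cityOf gi == c)).foldl
      (fun d gi => d.insert gi.1 gi.2) PySem.Dict.empty).items

def spain_alt (userinfo : List (String × List (String × String))) :
    List (String × List (String × List (String × String))) :=
  let cities := PySem.List.dedup (userinfo.map cityOf)
  cities.map (fun c => (c, innerFor userinfo c))

-- ===== PRECONDITION & SPEC =====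
-- Pre_ excludes exactly the inputs where some infos dict has no 'city' key: there A raises KeyError.
def Pre_spain (userinfo : List (String × List (String × String))) : Prop :=
  ∀ gi ∈ userinfo, "city" ∈ gi.2.map Prod.fst
instance (userinfo : List (String × List (String × String))) : Decidable (Pre_spain userinfo) := by unfold Pre_spain; infer_instance
def pvWitness_spain : (List (String × List (String × String))) :=
  [("alice", [("city", "rome")]), ("bob", [("city", "oslo")]), ("carl", [("city", "rome")])]

def Spec_spain (userinfo : List (String × List (String × String))) (out : List (String × List (String × List (String × String)))) : Prop := out = spain_alt userinfo
instance (userinfo : List (String × List (String × String))) (out : List (String × List (String × List (String × String)))) : Decidable (Spec_spain userinfo out) := by unfold Spec_spain; infer_instance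

-- ===== CLAIM (what is proved, stated in full; the proofs are below) =====
def Claim_equal_spain : Prop := ∀ (userinfo : List (String × List (String × String))), Dom_spain userinfo → Pre_spain userinfo → Spec_spain userinfo (spain userinfo)

-- ===== LEMMAS AND PROOFS =====

-- A's branch pair is a single Dict.modify
lemma spainStep_eq_modify (acc : PySem.Dict String (PySem.Dict String (List (String × String))))
    (gi : String × List (String × String)) :
    spainStep acc gi
      = acc.modify (cityOf gi) PySem.Dict.empty (fun d => d.insert gi.1 gi.2) := by
  unfold spainStep
  by_cases h : acc.contains (cityOf gi) = true
  · simp [h]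
  · simp only [Bool.not_eq_true] at h
    simp [h, PySem.Dict.modify, PySem.Dict.getD_of_not_contains]

-- value of a bucket after the whole loop = fold over the filtered list
lemma getD_foldl_step (l : List (String × List (String × String)))
    (d : PySem.Dict String (PySem.Dict String (List (String × String)))) (c : String) :
    (l.foldl spainStep d).getD c PySem.Dict.empty
      = (l.filter (fun gi => cityOf gi == c)).foldl
          (fun dd gi => dd.insert gi.1 gi.2) (d.getD c PySem.Dict.empty) := by
  induction l generalizing d with
  | nil => rfl
  | cons x l ih =>
    simp only [List.foldl_cons, List.filter_cons, ih, spainStep_eq_modify]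
    by_cases h : cityOf x = c
    · simp [h]
    · simp [PySem.Dict.getD_modify, h, Ne.symm h, beq_iff_eq]

lemma keys_foldl_step (l : List (String × List (String × String))) :
    (l.foldl spainStep PySem.Dict.empty).keys = PySem.List.dedup (l.map cityOf) := by
  rw [funext (fun acc => funext (fun gi => spainStep_eq_modify acc gi)),
      PySem.Dict.keys_foldl_modify_key]
  simp [PySem.Set.update_nil_left]

lemma nodup_keys_foldl_step (l : List (String × List (String × String))) :
    (l.foldl spainStep PySem.Dict.empty).keys.Nodup := by
  rw [funext (fun acc => funext (fun gi => spainStep_eq_modify acc gi))]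
  exact PySem.Dict.nodup_keys_foldl_modify_key _ _ _ _ _ PySem.Dict.nodup_keys_empty

-- ===== VERDICT (by name: the statement is the Claim_ definition above) =====
theorem spain_spec : Claim_equal_spain := by
  intro userinfo _ _
  unfold Spec_spain spain spain_alt
  rw [PySem.Dict.items_eq_map_keys _ (nodup_keys_foldl_step userinfo) PySem.Dict.empty,
      keys_foldl_step, List.map_map]
  refine List.map_congr_left (fun c hc => ?_)
  simp only [Function.comp]
  rw [getD_foldl_step, PySem.Dict.getD_empty]
  rfl
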